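-- pv_equiv track=rewrite | github.com/wangzizhe/GateForge | gateforge/agent_modelica_branch_switch_failure_classifier_v0_3_8.py | _is_infra
-- ===== SOURCE A (Python) =====
-- INFRA_HINTS = (
--     "not logged in",
--     "/login",
--     "quota",
--     "limit",
--     "rate limit",
--     "network",
--     "transport",
--     "mcp",
--     "url_error",
--     "connection reset",
--     "timeout",
-- )
--
-- def _norm(value: object) -> str:
--     return str(value or "").strip()
--
-- def _is_infra(row: dict) -> bool:
--     text = " | ".join(
--         part
--         for part in (
--             _norm(row.get("error_message")),
--             _norm(row.get("infra_failure_reason")),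
--         )
--         if part
--     ).lower()
--     return any(hint in text for hint in INFRA_HINTS)
-- ===== SOURCE B (Python) =====
-- INFRA_HINTS = (
--     "not logged in",
--     "/login",
--     "quota",
--     "limit",
--     "rate limit",
--     "network",
--     "transport",
--     "mcp",
--     "url_error",
--     "connection reset",
--     "timeout",
-- )
--
--
-- def _is_infra(row: dict) -> bool:
--     # No hint contains "|" or starts/ends with a space, so a hint can never
--     # span two fields: each field can be screened on its own, with no joining.
--     return any(
--         hint in str(row.get(field) or "").strip().lower()
--         for field in ("error_message", "infra_failure_reason")
--         for hint in INFRA_HINTS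
--     )
-- ===== Notes on version B (the rewrite author's own statement) =====
-- stated objective: simpler
-- what changed: B drops A's build-one-text phase (' | '-join of the filtered, stripped fields) entirely and screens each field independently; this is correct because no hint contains '|' or has a boundary space, so no hint occurrence can span the joint between the two fields.
import Mathlib
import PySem

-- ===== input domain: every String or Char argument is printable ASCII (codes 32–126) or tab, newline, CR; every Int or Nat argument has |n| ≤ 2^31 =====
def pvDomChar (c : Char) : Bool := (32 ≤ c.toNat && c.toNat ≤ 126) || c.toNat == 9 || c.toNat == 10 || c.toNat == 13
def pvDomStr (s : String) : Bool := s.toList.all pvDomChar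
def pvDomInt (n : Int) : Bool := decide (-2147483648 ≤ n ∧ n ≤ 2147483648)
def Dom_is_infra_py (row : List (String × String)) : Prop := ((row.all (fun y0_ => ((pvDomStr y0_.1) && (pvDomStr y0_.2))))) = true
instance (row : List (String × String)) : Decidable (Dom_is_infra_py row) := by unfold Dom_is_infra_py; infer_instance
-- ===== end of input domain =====

-- B drops A's build-one-text phase (the " | "-join of the filtered, stripped fields) and
-- screens each field independently; no hint contains '|' or has a boundary space, so a
-- hint occurrence can never span the joint (objective: simpler, not faster).

-- shared module constant INFRA_HINTS
def infraHints : List (List Char) :=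
  ["not logged in".toList, "/login".toList, "quota".toList, "limit".toList,
   "rate limit".toList, "network".toList, "transport".toList, "mcp".toList,
   "url_error".toList, "connection reset".toList, "timeout".toList]

-- ===== PORT A =====
-- _norm(row.get(k)): row.get gives None when missing (str(None or "") = ""), a string value
-- stays itself unless empty (then "" again); then .strip()
def normGet (row : List (String × String)) (k : String) : List Char :=
  PySem.Chars.strip (((PySem.Dict.mk row).get? k).getD "").toList

def is_infra_py (row : List (String × String)) : Bool :=
  let text := PySem.Chars.lower (PySem.Chars.join " | ".toList
      (([normGet row "error_message", normGet row "infra_failure_reason"]).filter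
        (fun part => !part.isEmpty)))
  infraHints.any (fun hint => PySem.Chars.isIn hint text)

-- ===== PORT B =====
def is_infra_py_alt (row : List (String × String)) : Bool :=
  (["error_message", "infra_failure_reason"] : List String).any (fun field =>
    let value := PySem.Chars.lower
      (PySem.Chars.strip (((PySem.Dict.mk row).get? field).getD "").toList)
    infraHints.any (fun hint => PySem.Chars.isIn hint value))

-- ===== PRECONDITION & SPEC =====
def Spec_is_infra_py (row : List (String × String)) (out : Bool) : Prop := out = is_infra_py_alt row
instance (row : List (String × String)) (out : Bool) : Decidable (Spec_is_infra_py row out) := by unfold Spec_is_infra_py; infer_instance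

-- ===== CLAIM (what is proved, stated in full; the proofs are below) =====
def Claim_equal_is_infra_py : Prop := ∀ (row : List (String × String)), Dom_is_infra_py row → Spec_is_infra_py row (is_infra_py row)

-- ===== LEMMAS AND PROOFS =====

-- every hint is nonempty, contains no '|', and neither starts nor ends with ' '
lemma infraHints_good : ∀ h ∈ infraHints,
    h ≠ [] ∧ h.head? ≠ some ' ' ∧ h.getLast? ≠ some ' ' ∧ '|' ∉ h := by decide

lemma any_congr_mem {α : Type} (l : List α) (p q : α → Bool)
    (h : ∀ x ∈ l, p x = q x) : l.any p = l.any q := by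
  induction l with
  | nil => rfl
  | cons a t ih =>
    simp only [List.any_cons, h a (List.mem_cons_self),
      ih (fun x hx => h x (List.mem_cons_of_mem a hx))]

lemma any_or {α : Type} (l : List α) (p q : α → Bool) :
    l.any (fun x => p x || q x) = (l.any p || l.any q) := by
  induction l with
  | nil => rfl
  | cons a t ih =>
    simp only [List.any_cons, ih]
    cases p a <;> cases q a <;> cases t.any p <;> cases t.any q <;> rfl

-- the key combinatorial fact: a pattern without '|' and without boundary spaces occurs in
-- a ++ " | " ++ b  iff it occurs in a or in b
lemma isIn_append_sep (h a b : List Char)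
    (hne : h ≠ []) (hhead : h.head? ≠ some ' ') (hlast : h.getLast? ≠ some ' ')
    (hbar : '|' ∉ h) :
    PySem.Chars.isIn h (a ++ ' ' :: '|' :: ' ' :: b)
      = (PySem.Chars.isIn h a || PySem.Chars.isIn h b) := by
  have hh0 : h.head hne ≠ ' ' := fun e => hhead (by rw [List.head?_eq_some_head hne, e])
  have hl0 : h.getLast hne ≠ ' ' := fun e => hlast (by rw [List.getLast?_eq_some_getLast hne, e])
  rw [Bool.eq_iff_iff]
  simp only [Bool.or_eq_true, PySem.Chars.isIn_iff_infix]
  constructor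
  · intro hin
    obtain ⟨j, hp⟩ := (PySem.Chars.exists_prefix_drop_iff_isIn h _).2
      ((PySem.Chars.isIn_iff_infix h _).2 hin)
    set m : List Char := ' ' :: '|' :: ' ' :: b with hm
    have hpos : 0 < h.length := List.length_pos_iff.2 hne
    have hmlen : m.length = b.length + 3 := by simp [hm]
    have hlen : j + h.length ≤ a.length + m.length := by
      have := hp.length_le
      simp only [List.length_drop, List.length_append] at this
      omega
    have hget : ∀ i (hi : i < h.length), h[i] = (a ++ m)[j + i]'(by
        simp only [List.length_append]; omega) := by
      intro i hi
      rw [hp.getElem hi, List.getElem_drop]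
    by_cases hA : j + h.length ≤ a.length
    · -- fully inside a
      left
      have hja : j ≤ a.length := by omega
      have hp2 : h <+: a.drop j ++ m := by
        rw [← List.drop_append_of_le_length hja]; exact hp
      have hd : (a.drop j).length = a.length - j := List.length_drop
      have e : h = (a.drop j).take h.length := by
        have := List.prefix_iff_eq_take.1 hp2
        rwa [List.take_append, Nat.sub_eq_zero_of_le (by omega), List.take_zero,
          List.append_nil] at this
      have : h <+: a.drop j := e ▸ List.take_prefix _ _
      exact this.isInfix.trans (List.drop_suffix j a).isInfix
    · by_cases hB : a.length + 3 ≤ j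
      · -- fully inside b
        right
        have e : (a ++ m).drop j = b.drop (j - a.length - 3) := by
          rw [List.drop_append]
          have e1 : a.drop j = [] := List.drop_eq_nil_of_le (by omega)
          have e2 : j - a.length = (j - a.length - 3) + 1 + 1 + 1 := by omega
          rw [e1, e2, hm]
          simp [List.drop_succ_cons]
        rw [e] at hp
        exact hp.isInfix.trans (List.drop_suffix _ b).isInfix
      · exfalso
        have hval : ∀ i (hi : i < h.length) (hge : a.length ≤ j + i),
            h[i] = m[j + i - a.length]'(by omega) := by
          intro i hi hge
          rw [hget i hi]
          exact List.getElem_append_right hge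
        by_cases hC : j ≤ a.length + 1 ∧ a.length + 1 < j + h.length
        · -- h covers the '|'
          have hi : a.length + 1 - j < h.length := by omega
          have hv := hval _ hi (by omega)
          have hidx : j + (a.length + 1 - j) - a.length = 1 := by omega
          simp only [hidx, hm, List.getElem_cons_succ, List.getElem_cons_zero] at hv
          exact hbar (hv ▸ List.getElem_mem hi)
        · by_cases hD : j + h.length ≤ a.length + 1
          · have hi : h.length - 1 < h.length := by omega
            have hv := hval _ hi (by omega)
            have hidx : j + (h.length - 1) - a.length = 0 := by omega
            simp only [hidx, hm, List.getElem_cons_zero] at hv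
            exact hl0 (by rw [List.getLast_eq_getElem, hv])
          · have hJ : j = a.length + 2 := by omega
            have hv := hval 0 hpos (by omega)
            have hidx : j + 0 - a.length = 2 := by omega
            simp only [hidx, hm, List.getElem_cons_succ, List.getElem_cons_zero] at hv
            exact hh0 (by rw [List.head_eq_getElem, hv])
  · rintro (hin | hin)
    · exact hin.trans (List.prefix_append a _).isInfix
    · exact hin.trans ((List.suffix_cons _ _).trans ((List.suffix_cons _ _).trans
        ((List.suffix_cons _ _).trans (List.suffix_append _ _)))).isInfix

lemma lower_sep_append (a b : List Char) :
    PySem.Chars.lower (a ++ ' ' :: '|' :: ' ' :: b)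
      = PySem.Chars.lower a ++ ' ' :: '|' :: ' ' :: PySem.Chars.lower b := by
  simp only [PySem.Chars.lower, List.map_append, List.map_cons,
    show PySem.Chars.lowerChar ' ' = ' ' from rfl, show PySem.Chars.lowerChar '|' = '|' from rfl]

-- no nonempty hint occurs in the empty text
lemma any_isIn_nil : infraHints.any (fun hint => PySem.Chars.isIn hint []) = false := by
  decide

lemma join_pair (s1 s2 : List Char) :
    PySem.Chars.join " | ".toList [s1, s2] = s1 ++ ' ' :: '|' :: ' ' :: s2 := by
  simp [PySem.Chars.join, List.intercalate]

lemma join_single (s : List Char) :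
    PySem.Chars.join " | ".toList [s] = s := by
  simp [PySem.Chars.join, List.intercalate]

-- ===== VERDICT (by name: the statement is the Claim_ definition above) =====
theorem is_infra_py_spec : Claim_equal_is_infra_py := by
  intro row _
  unfold Spec_is_infra_py is_infra_py is_infra_py_alt
  simp only [List.any_cons, List.any_nil, Bool.or_false]
  rw [show PySem.Chars.strip (((PySem.Dict.mk row).get? "error_message").getD "").toList
        = normGet row "error_message" from rfl,
      show PySem.Chars.strip (((PySem.Dict.mk row).get? "infra_failure_reason").getD "").toList
        = normGet row "infra_failure_reason" from rfl]
  generalize normGet row "error_message" = s1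
  generalize normGet row "infra_failure_reason" = s2
  by_cases h1 : s1 = [] <;> by_cases h2 : s2 = []
  · rw [h1, h2]; decide
  · have hne2 : s2.isEmpty = false := by simpa [List.isEmpty_iff] using h2
    rw [h1]
    simp only [List.filter, List.isEmpty_nil, Bool.not_true, hne2, Bool.not_false, join_single]
    rw [show PySem.Chars.lower [] = [] from rfl, any_isIn_nil, Bool.false_or]
  · have hne1 : s1.isEmpty = false := by simpa [List.isEmpty_iff] using h1
    rw [h2]
    simp only [List.filter, List.isEmpty_nil, Bool.not_true, hne1, Bool.not_false, join_single]
    rw [show PySem.Chars.lower [] = [] from rfl, any_isIn_nil, Bool.or_false]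
  · have hne1 : s1.isEmpty = false := by simpa [List.isEmpty_iff] using h1
    have hne2 : s2.isEmpty = false := by simpa [List.isEmpty_iff] using h2
    simp only [List.filter, hne1, hne2, Bool.not_false, join_pair]
    rw [lower_sep_append]
    rw [any_congr_mem _ _ (fun hint =>
        PySem.Chars.isIn hint (PySem.Chars.lower s1) || PySem.Chars.isIn hint (PySem.Chars.lower s2))
      (fun hint hm => by
        obtain ⟨hn, hh, hl, hb⟩ := infraHints_good hint hm
        exact isIn_append_sep hint _ _ hn hh hl hb)]
    rw [any_or]
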